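-- pv_equiv track=rewrite | github.com/AlpineCurt/Shufflez | ShufflezCalc.py | top_pair_kicker_rank
-- ===== SOURCE A (Python) =====
-- def top_pair_kicker_rank(board, rank_needed):
--     '''Returns an integer of the rank that would make the desired type
--     of top pair.  rank_needed is the nth top pair kicker rank needed.
--     i.e. 1 will return kicker rank needed for TPTK.  2 will return
--     top pair, second kicker and so on.'''
--
--     board_ranks = set()
--
--     for card in board:
--         board_ranks.add(card[0])
--
--     desired_rank = rank_needed - 1
--     rank_count = 0
--
--     for i in range(12, 0, -1):
--         if i not in board_ranks:
--             if desired_rank == rank_count: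
--                 return i
--             else:
--                 rank_count += 1
-- ===== SOURCE B (Python) =====
-- def top_pair_kicker_rank(board, rank_needed):
--     # kth-missing-rank by arithmetic skipping: start from the rank the answer
--     # would be on an empty board, then walk the board's distinct ranks from
--     # high to low, sliding the candidate down past each occupied rank.
--     if rank_needed < 1:
--         return None
--     cand = 13 - rank_needed
--     for b in sorted({card[0] for card in board if 1 <= card[0] <= 12}, reverse=True):
--         if b >= cand:
--             cand -= 1
--     return cand if cand >= 1 else None
-- ===== Notes on version B (the rewrite author's own statement) =====
-- stated objective: alternative
-- what changed: Replaces A's scan over all 12 ranks with a running kicker counter by the k-th-missing-element algorithm: start at the rank the answer would have on an empty board and slide the candidate down past each distinct board rank processed in descending order, never iterating over the rank space at all.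
import Mathlib
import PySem

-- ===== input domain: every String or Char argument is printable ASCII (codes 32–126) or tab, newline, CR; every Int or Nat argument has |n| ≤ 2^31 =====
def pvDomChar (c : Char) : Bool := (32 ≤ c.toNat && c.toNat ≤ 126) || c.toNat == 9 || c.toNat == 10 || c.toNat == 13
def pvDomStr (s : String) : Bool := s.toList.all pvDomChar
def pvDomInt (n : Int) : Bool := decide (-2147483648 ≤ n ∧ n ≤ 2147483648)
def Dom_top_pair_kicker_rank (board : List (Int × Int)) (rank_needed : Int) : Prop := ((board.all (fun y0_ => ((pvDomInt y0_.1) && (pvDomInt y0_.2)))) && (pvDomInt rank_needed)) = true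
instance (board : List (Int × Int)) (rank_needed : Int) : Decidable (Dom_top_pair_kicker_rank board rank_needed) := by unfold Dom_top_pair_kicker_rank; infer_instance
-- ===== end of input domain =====

-- B replaces A's scan of all 12 ranks with the "k-th missing element by arithmetic skipping"
-- algorithm over the sorted distinct board ranks only (objective: alternative; same cost here).

-- ===== PORT A =====
-- the 'for i in range(12, 0, -1)' loop with early return and the running rank_count
def tpkLoopA (board_ranks : PySem.Set Int) (desired_rank : Int) :
    List Int → Int → Option Int
  | [], _ => none
  | i :: rest, rank_count =>
    if !(PySem.Set.contains board_ranks i) then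
      (if desired_rank = rank_count then some i
       else tpkLoopA board_ranks desired_rank rest (rank_count + 1))
    else tpkLoopA board_ranks desired_rank rest rank_count

def top_pair_kicker_rank (board : List (Int × Int)) (rank_needed : Int) : Option Int :=
  let board_ranks : PySem.Set Int :=
    board.foldl (fun s card => PySem.Set.add s card.1) PySem.Set.empty
  tpkLoopA board_ranks (rank_needed - 1) (PySem.List.pyRange 12 0 (-1)) 0

-- ===== PORT B =====
def top_pair_kicker_rank_alt (board : List (Int × Int)) (rank_needed : Int) : Option Int :=
  if rank_needed < 1 then none
  else
    let ranks : List Int :=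
      PySem.List.sorted
        (PySem.Set.ofList ((board.filter (fun card => 1 ≤ card.1 && card.1 ≤ 12)).map (fun card => card.1)))
        (fun x => x) true
    let cand : Int := ranks.foldl (fun c b => if b ≥ c then c - 1 else c) (13 - rank_needed)
    if cand ≥ 1 then some cand else none

-- ===== PRECONDITION & SPEC =====
def Spec_top_pair_kicker_rank (board : List (Int × Int)) (rank_needed : Int) (out : Option Int) : Prop := out = top_pair_kicker_rank_alt board rank_needed
instance (board : List (Int × Int)) (rank_needed : Int) (out : Option Int) : Decidable (Spec_top_pair_kicker_rank board rank_needed out) := by unfold Spec_top_pair_kicker_rank; infer_instance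

-- ===== CLAIM =====
def Claim_equal_top_pair_kicker_rank : Prop := ∀ (board : List (Int × Int)) (rank_needed : Int), Dom_top_pair_kicker_rank board rank_needed → Spec_top_pair_kicker_rank board rank_needed (top_pair_kicker_rank board rank_needed)

-- ===== LEMMAS AND PROOFS =====
-- the descending list [n, n-1, …, 1] as Ints, for induction (proof-only helper)
def descList : Nat → List Int
  | 0 => []
  | n + 1 => ((n : Int) + 1) :: descList n

theorem mem_descList (n : Nat) (i : Int) : i ∈ descList n ↔ 1 ≤ i ∧ i ≤ (n : Int) := by
  induction n with
  | zero => simp [descList]; omega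
  | succ n ih => simp [descList, ih]; omega

-- A's counting scan over any list equals indexing into the filtered list.
theorem tpkLoopA_eq (br : PySem.Set Int) (d : Int) (l : List Int) :
    ∀ c : Int, tpkLoopA br d l c =
      if c ≤ d then (l.filter (fun i => !(PySem.Set.contains br i)))[(d - c).toNat]? else none := by
  induction l with
  | nil =>
    intro c; simp [tpkLoopA]
  | cons i rest ih =>
    intro c
    by_cases hp : i ∈ br
    · simp [tpkLoopA, hp, ih c]
    · by_cases hd : d = c
      · subst hd
        simp [tpkLoopA, hp]
      · by_cases hc : c ≤ d
        · have hc1 : c + 1 ≤ d := by omega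
          have ht : (d - c).toNat = (d - (c + 1)).toNat + 1 := by omega
          simp [tpkLoopA, hp, hd, ih (c + 1), hc, hc1, ht]
        · have hc1 : ¬ c + 1 ≤ d := by omega
          simp [tpkLoopA, hp, hd, ih (c + 1), hc, hc1]

-- the skipping fold is the identity when every element is below the candidate
theorem skipFold_const (R : List Int) : ∀ c : Int, (∀ b ∈ R, b < c) →
    R.foldl (fun c b => if b ≥ c then c - 1 else c) c = c := by
  induction R with
  | nil => intro c _; rfl
  | cons b R ih =>
    intro c h
    have hb : ¬ (b ≥ c) := by have := h b (by simp); omega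
    simp only [List.foldl_cons, if_neg hb]
    exact ih c (fun x hx => h x (by simp [hx]))

-- KEY: indexing the (k-1)-th rank missing from R among n..1 equals the skipping fold over R,
-- for R strictly descending with elements in [1, n].
theorem kth_missing_eq_skipFold :
    ∀ (n : Nat) (R : List Int) (k : Int), 1 ≤ k →
      R.Pairwise (· > ·) → (∀ b ∈ R, 1 ≤ b ∧ b ≤ (n : Int)) →
      ((descList n).filter (fun i => decide (i ∉ R)))[(k - 1).toNat]? =
        (if 1 ≤ R.foldl (fun c b => if b ≥ c then c - 1 else c) ((n : Int) + 1 - k) then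
           some (R.foldl (fun c b => if b ≥ c then c - 1 else c) ((n : Int) + 1 - k))
         else none) := by
  intro n
  induction n with
  | zero =>
    intro R k hk hp hb
    have hR : R = [] := by
      cases R with
      | nil => rfl
      | cons a R => exact absurd (hb a (by simp)) (by simp; omega)
    subst hR
    simp [descList]
    omega
  | succ n ih =>
    intro R k hk hp hb
    by_cases hmem : ((n : Int) + 1) ∈ R
    · -- head of R must be n+1
      cases R with
      | nil => simp at hmem
      | cons a R' =>
        have ha : a = (n : Int) + 1 := by
          rcases List.mem_cons.mp hmem with h | h
          · omega
          · have := (List.pairwise_cons.mp hp).1 _ h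
            have := (hb a (by simp)).2
            push_cast at this ⊢
            omega
        subst ha
        have hgt : ∀ b ∈ R', b < (n : Int) + 1 := fun b h => (List.pairwise_cons.mp hp).1 b h
        have hb' : ∀ b ∈ R', 1 ≤ b ∧ b ≤ (n : Int) := by
          intro b h
          have := hb b (by simp [h])
          have := hgt b h
          omega
        have hnm : ((n : Int) + 1) ∉ R' := fun h => by have := hgt _ h; omega
        have hfc : (descList n).filter (fun i => decide (i ∉ ((n : Int) + 1) :: R'))
            = (descList n).filter (fun i => decide (i ∉ R')) := by
          apply List.filter_congr
          intro i hi
          have := (mem_descList n i).mp hi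
          simp only [decide_eq_decide, List.mem_cons]
          constructor
          · intro h h'; exact h (Or.inr h')
          · intro h h'; rcases h' with h' | h'
            · omega
            · exact h h'
        simp only [descList, List.filter_cons]
        have hd : decide (((n : Int) + 1) ∉ ((n : Int) + 1) :: R') = false := by simp
        rw [hd]
        simp only [Bool.false_eq_true, if_false]
        rw [hfc]
        simp only [List.foldl_cons]
        push_cast
        rw [if_pos (by omega : (n : Int) + 1 ≥ (n : Int) + 1 + 1 - k)]
        have harg : (n : Int) + 1 + 1 - k - 1 = (n : Int) + 1 - k := by ring
        rw [harg]
        exact ih R' k hk (List.pairwise_cons.mp hp).2 hb'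
    · have hb' : ∀ b ∈ R, 1 ≤ b ∧ b ≤ (n : Int) := by
        intro b h
        have h1 := hb b h
        have : b ≠ (n : Int) + 1 := fun he => hmem (he ▸ h)
        push_cast at h1
        omega
      simp only [descList, List.filter_cons]
      have hd : decide (((n : Int) + 1) ∉ R) = true := by simpa using hmem
      rw [hd]
      rw [if_pos (by trivial)]
      by_cases hk1 : k = 1
      · subst hk1
        push_cast
        have harg : (n : Int) + 1 + 1 - 1 = (n : Int) + 1 := by ring
        rw [harg, skipFold_const R ((n : Int) + 1) (fun b h => by have := hb' b h; omega)]
        rw [if_pos (by omega)]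
        simp
      · have hk2 : 2 ≤ k := by omega
        have ht : (k - 1).toNat = (k - 1 - 1).toNat + 1 := by omega
        rw [ht]
        simp only [List.getElem?_cons_succ]
        push_cast
        have harg : (n : Int) + 1 + 1 - k = (n : Int) + 1 - (k - 1) := by ring
        rw [harg]
        exact ih R (k - 1) (by omega) hp hb'

theorem top_pair_kicker_rank_spec : Claim_equal_top_pair_kicker_rank := by
  intro board rank_needed _
  unfold Spec_top_pair_kicker_rank top_pair_kicker_rank top_pair_kicker_rank_alt
  rw [tpkLoopA_eq]
  by_cases hk : rank_needed < 1
  · rw [if_neg (by omega), if_pos hk]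
  · rw [if_pos (by omega : (0 : Int) ≤ rank_needed - 1), if_neg hk]
    set R : List Int :=
      PySem.List.sorted
        (PySem.Set.ofList ((board.filter (fun card => 1 ≤ card.1 && card.1 ≤ 12)).map (fun card => card.1)))
        (fun x => x) true with hR
    -- membership in R
    have hmemR : ∀ i : Int, i ∈ R ↔ (i ∈ board.map (fun card => card.1) ∧ 1 ≤ i ∧ i ≤ 12) := by
      intro i
      rw [hR, PySem.List.mem_sorted, PySem.Set.mem_ofList, List.mem_map]
      constructor
      · rintro ⟨c, hc, rfl⟩
        have := List.mem_filter.mp hc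
        refine ⟨List.mem_map.mpr ⟨c, this.1, rfl⟩, ?_⟩
        have h2 := this.2
        simp at h2
        exact h2
      · rintro ⟨hm, h1, h2⟩
        rcases List.mem_map.mp hm with ⟨c, hc, rfl⟩
        exact ⟨c, List.mem_filter.mpr ⟨hc, by simp; omega⟩, rfl⟩
    -- the set A builds = ofList of the mapped board
    have hbset : board.foldl (fun s card => PySem.Set.add s card.1) PySem.Set.empty
        = PySem.Set.ofList (board.map (fun card => card.1)) := by
      rw [PySem.Set.ofList_eq_foldl, List.foldl_map]
      rfl
    -- align the filters
    have hrange : PySem.List.pyRange 12 0 (-1) = descList 12 := by decide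
    have hfe : (PySem.List.pyRange 12 0 (-1)).filter
          (fun i => !(PySem.Set.contains (board.foldl (fun s card => PySem.Set.add s card.1) PySem.Set.empty) i))
        = (descList 12).filter (fun i => decide (i ∉ R)) := by
      rw [hrange]
      apply List.filter_congr
      intro i hi
      have hib := (mem_descList 12 i).mp hi
      rw [hbset]
      have hiff : (PySem.Set.contains (PySem.Set.ofList (board.map (fun card => card.1))) i = true)
          ↔ i ∈ R := by
        rw [PySem.Set.contains_iff, PySem.Set.mem_ofList, hmemR]
        constructor
        · intro h; exact ⟨h, hib.1, hib.2⟩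
        · exact fun h => h.1
      by_cases hm2 : i ∈ R
      · rw [hiff.mpr hm2]
        simp [hm2]
      · have hcf : PySem.Set.contains (PySem.Set.ofList (board.map (fun card => card.1))) i = false := by
          rcases Bool.eq_false_or_eq_true (PySem.Set.contains (PySem.Set.ofList (board.map (fun card => card.1))) i) with h | h
          · exact absurd (hiff.mp h) hm2
          · exact h
        rw [hcf]
        simp [hm2]
    rw [hfe]
    -- R is strictly descending with elements in [1, 12]
    have hpair : R.Pairwise (· > ·) := by
      have h1 : R.Pairwise (fun a b : Int => b ≤ a) := by
        rw [hR]; exact PySem.List.sorted_pairwise_rev _ _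
      have h2 : R.Nodup := by
        have := PySem.List.sorted_perm
          (PySem.Set.ofList ((board.filter (fun card => 1 ≤ card.1 && card.1 ≤ 12)).map (fun card => card.1)))
          (fun x : Int => x) true
        exact this.symm.nodup (PySem.Set.nodup_ofList _)
      exact (h1.and h2).imp (fun {a b} h => by
        rcases h with ⟨hle, hne⟩; omega)
    have hbnd : ∀ b ∈ R, 1 ≤ b ∧ b ≤ ((12 : Nat) : Int) := by
      intro b h
      have := (hmemR b).mp h
      push_cast
      exact this.2
    have := kth_missing_eq_skipFold 12 R rank_needed (by omega) hpair hbnd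
    have harg : ((12 : Nat) : Int) + 1 - rank_needed = 13 - rank_needed := by push_cast; ring
    rw [harg] at this
    have hidx : rank_needed - 1 - 0 = rank_needed - 1 := by ring
    rw [hidx, this]
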